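-- pv_equiv track=rewrite | github.com/ASSERT-KTH/Mokav | experiments/pynguin/c4b/single-return/generated_tests/src_252/7/src_252.py | func
-- ===== SOURCE A (Python) =====
-- def func(*args):
--
-- 	s = args[0]
-- 	ans = 0
-- 	c = 0
-- 	for i in s:
-- 	    c += 1
-- 	    if ((i == 'A') or (i == 'E') or (i == 'I') or (i == 'O') or (i == 'U') or (i == 'Y')):
-- 	        if (c > ans):
-- 	            ans = c
-- 	        c = 0
-- 	if ((c + 1) > ans):
-- 	    ans = (c + 1)
-- 	return(ans)
-- ===== SOURCE B (Python) =====
-- def func(*args):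
--     s = args[0]
--     positions = [i for i, ch in enumerate(s) if ch in 'AEIOUY']
--     ans = 0
--     prev = -1
--     for p in positions + [len(s)]:
--         if p - prev > ans:
--             ans = p - prev
--         prev = p
--     return ans
-- ===== Notes on version B (the rewrite author's own statement) =====
-- stated objective: alternative
-- what changed: B separates the work into two passes: it first collects the vowel indices with enumerate, then computes the maximum gap between consecutive positions (seeded with -1 and closed with len(s)), instead of A's single loop with a running reset counter.
import Mathlib
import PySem

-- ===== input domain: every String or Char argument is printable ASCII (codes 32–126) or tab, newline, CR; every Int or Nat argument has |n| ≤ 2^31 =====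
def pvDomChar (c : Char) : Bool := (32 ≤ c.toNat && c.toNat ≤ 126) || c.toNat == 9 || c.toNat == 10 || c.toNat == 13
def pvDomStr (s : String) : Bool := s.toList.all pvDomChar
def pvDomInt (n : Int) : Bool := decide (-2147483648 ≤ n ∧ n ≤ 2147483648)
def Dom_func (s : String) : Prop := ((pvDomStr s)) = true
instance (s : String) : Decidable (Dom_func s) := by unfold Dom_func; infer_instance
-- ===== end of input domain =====

-- B replaces A's single loop with reset counter by two passes: collect vowel indices, then max consecutive gap (alternative decomposition, same cost).


-- ===== PORT A =====
-- A's loop body: c += 1; if vowel: (if c > ans: ans = c); c = 0 — then the final c+1 check.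
def funcStepA (st : Int × Int) (i : Char) : Int × Int :=
  let c := st.2 + 1
  if i = 'A' ∨ i = 'E' ∨ i = 'I' ∨ i = 'O' ∨ i = 'U' ∨ i = 'Y' then
    (if c > st.1 then c else st.1, 0)
  else (st.1, c)

def func (s : String) : Int :=
  let st := s.toList.foldl funcStepA (0, 0)
  if st.2 + 1 > st.1 then st.2 + 1 else st.1

-- ===== PORT B =====
-- B: vowel positions via enumerate, then a max-gap fold over positions ++ [len(s)].
def funcStepB (st : Int × Int) (p : Int) : Int × Int :=
  (if p - st.2 > st.1 then p - st.2 else st.1, p)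

def func_alt (s : String) : Int :=
  let positions : List Int :=
    ((PySem.List.enumerate s.toList).filter (fun q => q.2 ∈ "AEIOUY".toList)).map (fun q => q.1)
  let st := (positions ++ [(s.toList.length : Int)]).foldl funcStepB (0, -1)
  st.1

-- ===== PRECONDITION & SPEC =====
def Spec_func (s : String) (out : Int) : Prop := out = func_alt s
instance (s : String) (out : Int) : Decidable (Spec_func s out) := by unfold Spec_func; infer_instance

-- ===== CLAIM (what is proved, stated in full; the proofs are below) =====
def Claim_equal_func : Prop := ∀ (s : String), Dom_func s → Spec_func s (func s)

-- ===== LEMMAS AND PROOFS =====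

-- proof-side name for A's final 'if c+1 > ans' step
def funcFinish (st : Int × Int) : Int :=
  if st.2 + 1 > st.1 then st.2 + 1 else st.1

theorem func_vowel_iff (i : Char) :
    (i = 'A' ∨ i = 'E' ∨ i = 'I' ∨ i = 'O' ∨ i = 'U' ∨ i = 'Y') ↔ i ∈ "AEIOUY".toList := by
  rw [show "AEIOUY".toList = ['A', 'E', 'I', 'O', 'U', 'Y'] from rfl]
  simp

-- Main invariant: A's fold from (ans, c) over l, finished with funcFinish, equals B's max-gap fold
-- over the vowel positions of l enumerated from k, started at (ans, k - 1 - c).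
theorem func_main (l : List Char) (k ans c : Int) :
    funcFinish (l.foldl funcStepA (ans, c)) =
    ((((PySem.List.enumerate l k).filter (fun q => q.2 ∈ "AEIOUY".toList)).map (fun q => q.1)
        ++ [k + l.length]).foldl funcStepB (ans, k - 1 - c)).1 := by
  induction l generalizing k ans c with
  | nil =>
      simp [funcFinish, funcStepB]
      split_ifs <;> omega
  | cons x t ih =>
      rw [PySem.List.enumerate_cons, List.foldl_cons,
        show k + ((x :: t).length : Int) = k + 1 + (t.length : Int) by push_cast [List.length_cons]; ring]
      by_cases hv : x ∈ "AEIOUY".toList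
      · have hA : (x = 'A' ∨ x = 'E' ∨ x = 'I' ∨ x = 'O' ∨ x = 'U' ∨ x = 'Y') :=
          (func_vowel_iff x).mpr hv
        have hsA : funcStepA (ans, c) x = ((if c + 1 > ans then c + 1 else ans), 0) := by
          simp only [funcStepA]; rw [if_pos hA]
        have hfil : ((k, x) :: PySem.List.enumerate t (k + 1)).filter
            (fun q => q.2 ∈ "AEIOUY".toList) =
            (k, x) :: (PySem.List.enumerate t (k + 1)).filter (fun q => q.2 ∈ "AEIOUY".toList) := by
          simp only [List.filter_cons, decide_eq_true hv, if_true]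
        have hb : funcStepB (ans, k - 1 - c) k = ((if c + 1 > ans then c + 1 else ans), k) := by
          simp only [funcStepB]
          rw [show k - (k - 1 - c) = c + 1 by ring]
        rw [hfil, List.map_cons, List.cons_append, List.foldl_cons, hb, hsA]
        have h2 := ih (k + 1) (if c + 1 > ans then c + 1 else ans) 0
        rw [show (k : Int) + 1 - 1 - 0 = k by ring] at h2
        exact h2
      · have hA : ¬ (x = 'A' ∨ x = 'E' ∨ x = 'I' ∨ x = 'O' ∨ x = 'U' ∨ x = 'Y') :=
          fun h => hv ((func_vowel_iff x).mp h)
        have hsA : funcStepA (ans, c) x = (ans, c + 1) := by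
          simp only [funcStepA]; rw [if_neg hA]
        have hfil : ((k, x) :: PySem.List.enumerate t (k + 1)).filter
            (fun q => q.2 ∈ "AEIOUY".toList) =
            (PySem.List.enumerate t (k + 1)).filter (fun q => q.2 ∈ "AEIOUY".toList) := by
          simp only [List.filter_cons, decide_eq_false hv, Bool.false_eq_true, if_false]
        rw [hfil, hsA]
        have h2 := ih (k + 1) ans (c + 1)
        rw [show (k : Int) + 1 - 1 - (c + 1) = k - 1 - c by ring] at h2
        exact h2

-- ===== VERDICT (by name: the statement is the Claim_ definition above) =====
theorem func_spec : Claim_equal_func := by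
  intro s _
  unfold Spec_func func func_alt
  have h := func_main s.toList 0 0 0
  rw [show (0 : Int) - 1 - 0 = -1 by ring,
    show (0 : Int) + (s.toList.length : Int) = (s.toList.length : Int) by ring] at h
  exact h
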